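-- pv_equiv track=rewrite | github.com/htn332805/RemDarwin | implementation/options/test_options_filter.py | parse_cli_output
-- ===== SOURCE A (Python) =====
-- from typing import Dict, List, Any, Optional
--
-- def parse_cli_output(stdout: str) -> Optional[Dict[str, int]]:
--     """Parse CLI output to extract contract counts."""
--     if 'No options passed filters' in stdout:
--         return {'num_contracts': 0, 'num_calls': 0, 'num_puts': 0}
--
--     lines = stdout.split('\n')
--     num_contracts = None
--     num_calls = None
--     num_puts = None
--     for line in lines:
--         if line.startswith('Total contracts:'):
--             try:
--                 num_contracts = int(line.split(':')[1].strip())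
--             except ValueError:
--                 pass
--         elif line.startswith('Calls:'):
--             try:
--                 num_calls = int(line.split(':')[1].strip())
--             except ValueError:
--                 pass
--         elif line.startswith('Puts:'):
--             try:
--                 num_puts = int(line.split(':')[1].strip())
--             except ValueError:
--                 pass
--     if num_contracts is not None and num_calls is not None and num_puts is not None:
--         return {'num_contracts': num_contracts, 'num_calls': num_calls, 'num_puts': num_puts}
--     return None
-- ===== SOURCE B (Python) =====
-- def _last_count(lines, prefix):
--     """Int from the last matching line whose count parses; None if no line parses."""
--     val = None
--     for line in lines:
--         if line.startswith(prefix):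
--             try:
--                 val = int(line.split(':')[1].strip())
--             except ValueError:
--                 pass
--     return val
--
--
-- def parse_cli_output(stdout):
--     if 'No options passed filters' in stdout:
--         return {'num_contracts': 0, 'num_calls': 0, 'num_puts': 0}
--     lines = stdout.split('\n')
--     c = _last_count(lines, 'Total contracts:')
--     k = _last_count(lines, 'Calls:')
--     p = _last_count(lines, 'Puts:')
--     if c is None or k is None or p is None:
--         return None
--     return {'num_contracts': c, 'num_calls': k, 'num_puts': p}
-- ===== Notes on version B (the rewrite author's own statement) =====
-- stated objective: simpler
-- what changed: Replaced A's single loop carrying three accumulators behind an if/elif chain by one reusable helper that scans the lines for the last successfully parsed 'prefix:'-line, called once per prefix.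
import Mathlib
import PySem

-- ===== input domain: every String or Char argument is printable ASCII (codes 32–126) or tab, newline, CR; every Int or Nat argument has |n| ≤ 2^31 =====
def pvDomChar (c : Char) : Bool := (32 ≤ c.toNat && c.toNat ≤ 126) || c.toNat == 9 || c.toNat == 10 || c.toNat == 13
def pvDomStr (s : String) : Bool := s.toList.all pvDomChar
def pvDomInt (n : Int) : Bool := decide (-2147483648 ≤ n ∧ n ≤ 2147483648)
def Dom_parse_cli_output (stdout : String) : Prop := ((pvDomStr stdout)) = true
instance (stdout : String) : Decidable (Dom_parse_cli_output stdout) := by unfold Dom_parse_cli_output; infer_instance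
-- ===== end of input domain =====

-- B replaces A's single triple-accumulator if/elif loop by a reusable last-parsed-count
-- helper called three times, once per label (objective: simpler decomposition; same cost).
-- Both ports work on List Char lines (exact: split(sep) with a non-empty literal sep is Chars.splitOn).

-- ===== PORT A =====
-- int(line.split(':')[1].strip()); a none from pyGet? is unreachable (the line contains ':'),
-- a none from ofChars? is the caught ValueError
def pvParseCountA (line : List Char) : Option Int :=
  (PySem.List.pyGet? (PySem.Chars.splitOn line [':']) 1).bind
    (fun s => PySem.Int.ofChars? (PySem.Chars.strip s))

-- body of A's for-loop: the if/elif chain over the state (num_contracts, num_calls, num_puts)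
def pvLineA (st : Option Int × Option Int × Option Int) (line : List Char) :
    Option Int × Option Int × Option Int :=
  if PySem.Chars.startswith line "Total contracts:".toList then
    (match pvParseCountA line with | some n => some n | none => st.1, st.2.1, st.2.2)
  else if PySem.Chars.startswith line "Calls:".toList then
    (st.1, (match pvParseCountA line with | some n => some n | none => st.2.1), st.2.2)
  else if PySem.Chars.startswith line "Puts:".toList then
    (st.1, st.2.1, match pvParseCountA line with | some n => some n | none => st.2.2)
  else st

def parse_cli_output (stdout : String) : Option (List (String × Int)) :=
  if PySem.Str.isIn "No options passed filters" stdout then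
    some [("num_contracts", 0), ("num_calls", 0), ("num_puts", 0)]
  else
    let lines := PySem.Chars.splitOn stdout.toList ['\n']
    match lines.foldl pvLineA (none, none, none) with
    | (some c, some k, some p) =>
        some [("num_contracts", c), ("num_calls", k), ("num_puts", p)]
    | _ => none

-- ===== PORT B =====
def pvParseCountB (line : List Char) : Option Int :=
  match PySem.List.pyGet? (PySem.Chars.splitOn line [':']) 1 with
  | none => none
  | some piece => PySem.Int.ofChars? (PySem.Chars.strip piece)

-- body of _last_count's loop
def pvStepB (pre : List Char) (val : Option Int) (line : List Char) : Option Int :=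
  if PySem.Chars.startswith line pre then
    match pvParseCountB line with | some n => some n | none => val
  else val

def pvLastCount (lines : List (List Char)) (pre : List Char) : Option Int :=
  lines.foldl (pvStepB pre) none

def parse_cli_output_alt (stdout : String) : Option (List (String × Int)) :=
  if PySem.Str.isIn "No options passed filters" stdout then
    some [("num_contracts", 0), ("num_calls", 0), ("num_puts", 0)]
  else
    let lines := PySem.Chars.splitOn stdout.toList ['\n']
    -- 'if c is None or k is None or p is None: return None' as nested option matches
    match pvLastCount lines "Total contracts:".toList with
    | none => none
    | some c =>
      match pvLastCount lines "Calls:".toList with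
      | none => none
      | some k =>
        match pvLastCount lines "Puts:".toList with
        | none => none
        | some p => some [("num_contracts", c), ("num_calls", k), ("num_puts", p)]

-- ===== PRECONDITION & SPEC =====
def Spec_parse_cli_output (stdout : String) (out : Option (List (String × Int))) : Prop := out = parse_cli_output_alt stdout
instance (stdout : String) (out : Option (List (String × Int))) : Decidable (Spec_parse_cli_output stdout out) := by unfold Spec_parse_cli_output; infer_instance

-- ===== CLAIM (what is proved, stated in full; the proofs are below) =====
def Claim_equal_parse_cli_output : Prop := ∀ (stdout : String), Dom_parse_cli_output stdout → Spec_parse_cli_output stdout (parse_cli_output stdout)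

-- ===== LEMMAS AND PROOFS =====

-- the two ports parse a line identically (bind vs match)
theorem pv_parse_eq (line : List Char) : pvParseCountB line = pvParseCountA line := by
  unfold pvParseCountA pvParseCountB
  cases PySem.List.pyGet? (PySem.Chars.splitOn line [':']) 1 <;> rfl

-- two prefixes whose first characters differ cannot both be prefixes of a line
theorem pv_startswith_excl (s : List Char) (c d : Char) (p q : List Char)
    (hp : p.head? = some c) (hq : q.head? = some d)
    (hne : c ≠ d) (h : PySem.Chars.startswith s p = true) :
    PySem.Chars.startswith s q = false := by
  by_contra hq'
  have hq2 : PySem.Chars.startswith s q = true := by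
    cases hb : PySem.Chars.startswith s q with
    | false => exact absurd hb hq'
    | true => rfl
  obtain ⟨t1, ht1⟩ := (PySem.Chars.startswith_iff s p).1 h
  obtain ⟨t2, ht2⟩ := (PySem.Chars.startswith_iff s q).1 hq2
  have e1 : s.head? = some c := by rw [← ht1, List.head?_append, hp]; rfl
  have e2 : s.head? = some d := by rw [← ht2, List.head?_append, hq]; rfl
  rw [e1] at e2
  exact hne (by injection e2)

-- A's triple fold splits into B's three independent folds
theorem pv_fold_split (lines : List (List Char)) (c k p : Option Int) :
    lines.foldl pvLineA (c, k, p) =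
      (lines.foldl (pvStepB "Total contracts:".toList) c,
       lines.foldl (pvStepB "Calls:".toList) k,
       lines.foldl (pvStepB "Puts:".toList) p) := by
  induction lines generalizing c k p with
  | nil => rfl
  | cons line rest ih =>
    simp only [List.foldl_cons]
    have hstep : pvLineA (c, k, p) line =
        (pvStepB "Total contracts:".toList c line, pvStepB "Calls:".toList k line,
         pvStepB "Puts:".toList p line) := by
      simp only [pvLineA, pvStepB, pv_parse_eq]
      by_cases hT : PySem.Chars.startswith line "Total contracts:".toList = true
      · have hC := pv_startswith_excl line 'T' 'C' "Total contracts:".toList "Calls:".toList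
          (by decide) (by decide) (by decide) hT
        have hP := pv_startswith_excl line 'T' 'P' "Total contracts:".toList "Puts:".toList
          (by decide) (by decide) (by decide) hT
        rw [hT, hC, hP]; simp
      · rw [Bool.not_eq_true] at hT
        by_cases hC : PySem.Chars.startswith line "Calls:".toList = true
        · have hP := pv_startswith_excl line 'C' 'P' "Calls:".toList "Puts:".toList
            (by decide) (by decide) (by decide) hC
          rw [hT, hC, hP]; simp
        · rw [Bool.not_eq_true] at hC
          by_cases hP : PySem.Chars.startswith line "Puts:".toList = true
          · rw [hT, hC, hP]; simp
          · rw [Bool.not_eq_true] at hP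
            rw [hT, hC, hP]; simp
    rw [hstep, ih]

-- ===== VERDICT (by name: the statement is the Claim_ definition above) =====
theorem parse_cli_output_spec : Claim_equal_parse_cli_output := by
  intro stdout _
  unfold Spec_parse_cli_output parse_cli_output parse_cli_output_alt pvLastCount
  by_cases h : PySem.Str.isIn "No options passed filters" stdout = true
  · simp only [h, if_true]
  · rw [Bool.not_eq_true] at h
    simp only [h, Bool.false_eq_true, if_false]
    rw [pv_fold_split]
    generalize List.foldl (pvStepB "Total contracts:".toList) none
      (PySem.Chars.splitOn stdout.toList ['\n']) = a
    generalize List.foldl (pvStepB "Calls:".toList) none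
      (PySem.Chars.splitOn stdout.toList ['\n']) = b
    generalize List.foldl (pvStepB "Puts:".toList) none
      (PySem.Chars.splitOn stdout.toList ['\n']) = cc
    cases a <;> cases b <;> cases cc <;> rfl
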